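-- pv_equiv track=rewrite | github.com/ronyka77/Stockpredictor_with_ml | src/data_collector/indicator_pipeline/consolidated_storage.py | _get_columns_by_category
-- ===== SOURCE A (Python) =====
-- from typing import Dict, List, Any, Optional
--
-- def _get_columns_by_category(columns: List[str], categories: List[str]) -> List[str]:
--     """Filter columns by feature categories"""
--     category_columns = []
--
--     for col in columns:
--         if col in ['ticker', 'date']:  # Skip metadata columns
--             continue
--
--         col_lower = col.lower()
--         for category in categories:
--             if category == 'trend' and any(x in col_lower for x in ['sma', 'ema', 'macd', 'ichimoku']):
--                 category_columns.append(col)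
--                 break
--             elif category == 'momentum' and any(x in col_lower for x in ['rsi', 'stoch', 'roc', 'williams']):
--                 category_columns.append(col)
--                 break
--             elif category == 'volatility' and any(x in col_lower for x in ['bb', 'bollinger', 'atr', 'volatility']):
--                 category_columns.append(col)
--                 break
--             elif category == 'volume' and any(x in col_lower for x in ['obv', 'vpt', 'ad_line', 'volume', 'mfi']):
--                 category_columns.append(col)
--                 break
--
--     return category_columns
-- ===== SOURCE B (Python) =====
-- _CATEGORY_KEYWORDS = {
--     'trend': ('sma', 'ema', 'macd', 'ichimoku'),
--     'momentum': ('rsi', 'stoch', 'roc', 'williams'),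
--     'volatility': ('bb', 'bollinger', 'atr', 'volatility'),
--     'volume': ('obv', 'vpt', 'ad_line', 'volume', 'mfi'),
-- }
--
--
-- def _get_columns_by_category(columns, categories):
--     """Filter columns by feature categories (keyword-major marking pass)."""
--     # Invert the traversal: for each active keyword, mark the indices of the
--     # columns it matches; finally emit the marked columns in original order.
--     # Correct because a column belongs to the result iff it is non-metadata
--     # and SOME active keyword occurs in its lowered name, regardless of the
--     # order in which matches are discovered; emitting by index preserves
--     # A's output order and uniqueness.
--     selected = set()
--     for category in categories:
--         for kw in _CATEGORY_KEYWORDS.get(category, ()):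
--             for i, col in enumerate(columns):
--                 if col not in ('ticker', 'date') and kw in col.lower():
--                     selected.add(i)
--     return [col for i, col in enumerate(columns) if i in selected]
-- ===== Notes on version B (the rewrite author's own statement) =====
-- stated objective: alternative
-- what changed: Inverts the traversal: instead of scanning categories per column, B loops keyword-major, marking the index set of columns each active keyword matches, then emits the marked columns in original order; output equality holds because membership is order-independent and index emission restores A's order and uniqueness.
import Mathlib
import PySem

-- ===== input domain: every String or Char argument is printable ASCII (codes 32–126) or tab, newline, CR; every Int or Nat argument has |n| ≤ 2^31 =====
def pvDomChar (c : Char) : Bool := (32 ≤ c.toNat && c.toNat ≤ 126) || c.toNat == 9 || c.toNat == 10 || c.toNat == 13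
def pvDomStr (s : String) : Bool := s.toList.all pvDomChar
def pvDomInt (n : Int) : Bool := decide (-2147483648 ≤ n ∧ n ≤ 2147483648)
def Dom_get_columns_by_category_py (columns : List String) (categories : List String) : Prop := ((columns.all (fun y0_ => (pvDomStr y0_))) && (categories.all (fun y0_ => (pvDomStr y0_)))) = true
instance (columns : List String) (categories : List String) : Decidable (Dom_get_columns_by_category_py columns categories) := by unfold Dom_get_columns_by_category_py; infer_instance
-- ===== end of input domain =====

-- B inverts the traversal (keyword-major marking of column indices, then emission in order)
-- instead of A's per-column category scan; same cost, alternative structure.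
-- ===== PORT A =====
def pvCatMatch (col_lower : String) : List String → Bool
  | [] => false
  | category :: rest =>
    if category == "trend" && (["sma", "ema", "macd", "ichimoku"].any (fun x => PySem.Str.isIn x col_lower)) then true
    else if category == "momentum" && (["rsi", "stoch", "roc", "williams"].any (fun x => PySem.Str.isIn x col_lower)) then true
    else if category == "volatility" && (["bb", "bollinger", "atr", "volatility"].any (fun x => PySem.Str.isIn x col_lower)) then true
    else if category == "volume" && (["obv", "vpt", "ad_line", "volume", "mfi"].any (fun x => PySem.Str.isIn x col_lower)) then true
    else pvCatMatch col_lower rest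

def get_columns_by_category_py (columns : List String) (categories : List String) : List String :=
  columns.foldl (fun category_columns col =>
    if col == "ticker" || col == "date" then category_columns
    else
      let col_lower := PySem.Str.lower col
      if pvCatMatch col_lower categories then category_columns ++ [col]
      else category_columns) []

-- ===== PORT B =====
def pvCategoryKeywords : PySem.Dict String (List String) :=
  PySem.Dict.ofList
    [("trend", ["sma", "ema", "macd", "ichimoku"]),
     ("momentum", ["rsi", "stoch", "roc", "williams"]),
     ("volatility", ["bb", "bollinger", "atr", "volatility"]),
     ("volume", ["obv", "vpt", "ad_line", "volume", "mfi"])]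

def get_columns_by_category_py_alt (columns : List String) (categories : List String) : List String :=
  let selected : PySem.Set Int :=
    categories.foldl (fun sel category =>
      (pvCategoryKeywords.getD category []).foldl (fun sel kw =>
        (PySem.List.enumerate columns).foldl (fun sel p =>
          if !(p.2 == "ticker" || p.2 == "date") && PySem.Str.isIn kw (PySem.Str.lower p.2)
          then PySem.Set.add sel p.1 else sel) sel) sel) PySem.Set.empty
  ((PySem.List.enumerate columns).filter (fun p => PySem.Set.contains selected p.1)).map (·.2)

-- ===== PRECONDITION & SPEC =====
def Spec_get_columns_by_category_py (columns : List String) (categories : List String) (out : List String) : Prop := out = get_columns_by_category_py_alt columns categories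
instance (columns : List String) (categories : List String) (out : List String) : Decidable (Spec_get_columns_by_category_py columns categories out) := by unfold Spec_get_columns_by_category_py; infer_instance

-- ===== CLAIM (what is proved, stated in full; the proofs are below) =====
def Claim_equal_get_columns_by_category_py : Prop := ∀ (columns : List String) (categories : List String), Dom_get_columns_by_category_py columns categories → Spec_get_columns_by_category_py columns categories (get_columns_by_category_py columns categories)

-- ===== LEMMAS AND PROOFS =====
theorem pvKw_getD (c : String) :
    pvCategoryKeywords.getD c [] =
      if c = "trend" then ["sma", "ema", "macd", "ichimoku"]
      else if c = "momentum" then ["rsi", "stoch", "roc", "williams"]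
      else if c = "volatility" then ["bb", "bollinger", "atr", "volatility"]
      else if c = "volume" then ["obv", "vpt", "ad_line", "volume", "mfi"]
      else [] := by
  have h : pvCategoryKeywords = PySem.Dict.mk
      [("trend", ["sma", "ema", "macd", "ichimoku"]),
       ("momentum", ["rsi", "stoch", "roc", "williams"]),
       ("volatility", ["bb", "bollinger", "atr", "volatility"]),
       ("volume", ["obv", "vpt", "ad_line", "volume", "mfi"])] := by decide
  rw [h, PySem.Dict.getD_eq_get?_getD]
  by_cases h1 : c = "trend"
  · subst h1; decide
  by_cases h2 : c = "momentum"
  · subst h2; decide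
  by_cases h3 : c = "volatility"
  · subst h3; decide
  by_cases h4 : c = "volume"
  · subst h4; decide
  have n1 : ("trend" == c) = false := by simp; exact fun e => h1 e.symm
  have n2 : ("momentum" == c) = false := by simp; exact fun e => h2 e.symm
  have n3 : ("volatility" == c) = false := by simp; exact fun e => h3 e.symm
  have n4 : ("volume" == c) = false := by simp; exact fun e => h4 e.symm
  simp only [PySem.Dict.get?_mk_cons, n1, n2, n3, n4, if_false, Bool.false_eq_true]
  simp [h1, h2, h3, h4, PySem.Dict.get?]

theorem pvCatMatch_eq_any (low : String) (cats : List String) :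
    pvCatMatch low cats =
      cats.any (fun c => (pvCategoryKeywords.getD c []).any (fun k => PySem.Str.isIn k low)) := by
  induction cats with
  | nil => rfl
  | cons c rest ih =>
    simp only [List.any_cons, pvCatMatch, ih, pvKw_getD]
    by_cases h1 : c = "trend"
    · subst h1; simp
    by_cases h2 : c = "momentum"
    · subst h2; simp
    by_cases h3 : c = "volatility"
    · subst h3; simp
    by_cases h4 : c = "volume"
    · subst h4; simp
    simp [h1, h2, h3, h4, beq_iff_eq]

-- membership in a fold that conditionally adds, generalized over one level
theorem pv_mem_foldl_step {α : Type} (l : List α) (g : PySem.Set Int → α → PySem.Set Int)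
    (P : α → Int → Prop)
    (hg : ∀ sel x y, y ∈ g sel x ↔ y ∈ sel ∨ P x y) :
    ∀ (sel : PySem.Set Int) (y : Int), y ∈ l.foldl g sel ↔ y ∈ sel ∨ ∃ x ∈ l, P x y := by
  induction l with
  | nil => simp
  | cons x xs ih =>
    intro sel y
    simp only [List.foldl_cons, ih, hg, List.mem_cons]
    constructor
    · rintro ((h | h) | ⟨z, hz, hp⟩)
      · exact Or.inl h
      · exact Or.inr ⟨x, Or.inl rfl, h⟩
      · exact Or.inr ⟨z, Or.inr hz, hp⟩
    · rintro (h | ⟨z, (rfl | hz), hp⟩)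
      · exact Or.inl (Or.inl h)
      · exact Or.inl (Or.inr hp)
      · exact Or.inr ⟨z, hz, hp⟩

-- the predicate B's inner loop tests, as a Prop on an enumerated pair and a keyword
def pvHit (kw : String) (p : Int × String) : Prop :=
  (!(p.2 == "ticker" || p.2 == "date") && PySem.Str.isIn kw (PySem.Str.lower p.2)) = true

theorem pv_mem_selected (columns categories : List String) (y : Int) :
    y ∈ (categories.foldl (fun sel category =>
      (pvCategoryKeywords.getD category []).foldl (fun sel kw =>
        (PySem.List.enumerate columns).foldl (fun sel p =>
          if !(p.2 == "ticker" || p.2 == "date") && PySem.Str.isIn kw (PySem.Str.lower p.2)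
          then PySem.Set.add sel p.1 else sel) sel) sel) PySem.Set.empty)
    ↔ ∃ c ∈ categories, ∃ kw ∈ pvCategoryKeywords.getD c [],
        ∃ p ∈ PySem.List.enumerate columns, pvHit kw p ∧ y = p.1 := by
  have hinner : ∀ (kw : String) (sel : PySem.Set Int) (y : Int),
      y ∈ (PySem.List.enumerate columns).foldl (fun sel p =>
          if !(p.2 == "ticker" || p.2 == "date") && PySem.Str.isIn kw (PySem.Str.lower p.2)
          then PySem.Set.add sel p.1 else sel) sel
      ↔ y ∈ sel ∨ ∃ p ∈ PySem.List.enumerate columns, pvHit kw p ∧ y = p.1 := by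
    intro kw sel y
    refine pv_mem_foldl_step _ _ (fun p y => pvHit kw p ∧ y = p.1) ?_ sel y
    intro sel p y
    unfold pvHit
    by_cases h : (!(p.2 == "ticker" || p.2 == "date") && PySem.Str.isIn kw (PySem.Str.lower p.2)) = true
    · rw [if_pos h, PySem.Set.mem_add]
      constructor
      · rintro (hs | rfl)
        · exact Or.inl hs
        · exact Or.inr ⟨h, rfl⟩
      · rintro (hs | ⟨_, rfl⟩)
        · exact Or.inl hs
        · exact Or.inr rfl
    · rw [if_neg h]
      constructor
      · exact Or.inl
      · rintro (hs | ⟨hh, rfl⟩)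
        · exact hs
        · exact absurd hh h
  have hmid : ∀ (c : String) (sel : PySem.Set Int) (y : Int),
      y ∈ (pvCategoryKeywords.getD c []).foldl (fun sel kw =>
        (PySem.List.enumerate columns).foldl (fun sel p =>
          if !(p.2 == "ticker" || p.2 == "date") && PySem.Str.isIn kw (PySem.Str.lower p.2)
          then PySem.Set.add sel p.1 else sel) sel) sel
      ↔ y ∈ sel ∨ ∃ kw ∈ pvCategoryKeywords.getD c [],
          ∃ p ∈ PySem.List.enumerate columns, pvHit kw p ∧ y = p.1 := by
    intro c sel y
    exact pv_mem_foldl_step _ _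
      (fun kw y => ∃ p ∈ PySem.List.enumerate columns, pvHit kw p ∧ y = p.1)
      (fun sel kw y => hinner kw sel y) sel y
  have := pv_mem_foldl_step categories _
      (fun c y => ∃ kw ∈ pvCategoryKeywords.getD c [],
          ∃ p ∈ PySem.List.enumerate columns, pvHit kw p ∧ y = p.1)
      (fun sel c y => hmid c sel y) PySem.Set.empty y
  simpa [PySem.Set.empty] using this

-- filtering enumerated pairs by a predicate of the second component, then projecting
theorem pv_filter_enumerate_map {q : String → Bool} :
    ∀ (xs : List String) (s : Int),
    (((PySem.List.enumerate xs s).filter (fun p => q p.2)).map (·.2)) = xs.filter q := by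
  intro xs
  induction xs with
  | nil => intro s; rfl
  | cons x t ih =>
    intro s
    simp only [PySem.List.enumerate_cons, List.filter_cons]
    by_cases h : q x
    · simp [h, ih]
    · simp [h, ih]

-- ===== VERDICT (by name: the statement is the Claim_ definition above) =====
theorem get_columns_by_category_py_spec : Claim_equal_get_columns_by_category_py := by
  intro columns categories _
  unfold Spec_get_columns_by_category_py get_columns_by_category_py get_columns_by_category_py_alt
  -- the common predicate on a column name
  set q : String → Bool := fun col =>
    !(col == "ticker" || col == "date") &&
      categories.any (fun c => (pvCategoryKeywords.getD c []).any
        (fun k => PySem.Str.isIn k (PySem.Str.lower col))) with hq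
  -- A is a filter by q
  have hA : columns.foldl (fun category_columns col =>
      if col == "ticker" || col == "date" then category_columns
      else
        let col_lower := PySem.Str.lower col
        if pvCatMatch col_lower categories then category_columns ++ [col]
        else category_columns) [] = columns.filter q := by
    have hstep : ∀ (acc : List String) (col : String),
        (if col == "ticker" || col == "date" then acc
         else if pvCatMatch (PySem.Str.lower col) categories then acc ++ [col] else acc) =
        (if q col = true then acc ++ [col] else acc) := by
      intro acc col
      simp only [hq, pvCatMatch_eq_any]
      by_cases hm : (col == "ticker" || col == "date") = true
      · simp [hm]
      · simp only [Bool.not_eq_true] at hm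
        simp [hm]
    refine Eq.trans (PySem.List.foldl_congr_mem columns _ _ [] (fun acc col _ => hstep acc col)) ?_
    rw [PySem.List.foldl_append_if_eq_filter]
    simp
  rw [hA]
  -- B: membership of an index in `selected` decides exactly q of the column at that index
  have hcontains : ∀ p ∈ PySem.List.enumerate columns,
      (PySem.Set.contains (categories.foldl (fun sel category =>
        (pvCategoryKeywords.getD category []).foldl (fun sel kw =>
          (PySem.List.enumerate columns).foldl (fun sel p =>
            if !(p.2 == "ticker" || p.2 == "date") && PySem.Str.isIn kw (PySem.Str.lower p.2)
            then PySem.Set.add sel p.1 else sel) sel) sel) PySem.Set.empty) p.1) = q p.2 := by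
    intro p hp
    rcases (PySem.List.mem_enumerate_iff _ _ _).1 hp with ⟨k, hk, rfl⟩
    show PySem.Set.contains _ (0 + (k : Int)) = q columns[k]
    by_cases hqv : q columns[k] = true
    case neg =>
      rw [Bool.not_eq_true] at hqv
      rw [hqv, Bool.eq_false_iff, Ne, PySem.Set.contains_iff, pv_mem_selected]
      rintro ⟨c, hc, kw, hkw, p', hp', hhit, heq⟩
      rcases (PySem.List.mem_enumerate_iff _ _ _).1 hp' with ⟨k', hk', rfl⟩
      have hkk : k = k' := by simp only [] at heq; omega
      subst hkk
      unfold pvHit at hhit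
      have hhit' : (!(columns[k] == "ticker" || columns[k] == "date") &&
          PySem.Str.isIn kw (PySem.Str.lower columns[k])) = true := hhit
      rw [Bool.and_eq_true] at hhit'
      simp only [hq] at hqv
      rcases Bool.and_eq_false_iff.1 hqv with hmeta | hany
      · rw [hhit'.1] at hmeta; cases hmeta
      · have hT : categories.any (fun c => (pvCategoryKeywords.getD c []).any
            (fun k' => PySem.Str.isIn k' (PySem.Str.lower columns[k]))) = true :=
          List.any_eq_true.2 ⟨c, hc, List.any_eq_true.2 ⟨kw, hkw, hhit'.2⟩⟩
        rw [hT] at hany; cases hany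
    case pos =>
      rw [hqv, PySem.Set.contains_iff, pv_mem_selected]
      simp only [hq, Bool.and_eq_true, List.any_eq_true] at hqv
      rcases hqv with ⟨hmeta, c, hc, kw, hkw, hin⟩
      exact ⟨c, hc, kw, hkw, (0 + (k : Int), columns[k]),
        PySem.List.mem_enumerate_iff _ _ _ |>.2 ⟨k, hk, rfl⟩,
        by
          show (!(columns[k] == "ticker" || columns[k] == "date") &&
            PySem.Str.isIn kw (PySem.Str.lower columns[k])) = true
          simp only [Bool.and_eq_true]
          exact ⟨hmeta, hin⟩, rfl⟩
  have hfc : (PySem.List.enumerate columns).filter (fun p =>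
        PySem.Set.contains (categories.foldl (fun sel category =>
        (pvCategoryKeywords.getD category []).foldl (fun sel kw =>
          (PySem.List.enumerate columns).foldl (fun sel p =>
            if !(p.2 == "ticker" || p.2 == "date") && PySem.Str.isIn kw (PySem.Str.lower p.2)
            then PySem.Set.add sel p.1 else sel) sel) sel) PySem.Set.empty) p.1)
      = (PySem.List.enumerate columns).filter (fun p => q p.2) :=
    List.filter_congr (fun p hp => hcontains p hp)
  show columns.filter q =
    ((PySem.List.enumerate columns).filter (fun p =>
        PySem.Set.contains (categories.foldl (fun sel category =>
        (pvCategoryKeywords.getD category []).foldl (fun sel kw =>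
          (PySem.List.enumerate columns).foldl (fun sel p =>
            if !(p.2 == "ticker" || p.2 == "date") && PySem.Str.isIn kw (PySem.Str.lower p.2)
            then PySem.Set.add sel p.1 else sel) sel) sel) PySem.Set.empty) p.1)).map (fun p => p.2)
  rw [hfc, pv_filter_enumerate_map]
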